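-- pv_equiv track=rewrite | github.com/yethikrishna/yeti-ai | backend/main.py | route_yeti_model
-- ===== SOURCE A (Python) =====
-- def route_yeti_model(prompt: str, selected_model: str = "yeti-default") -> str:
--     prompt_lower = prompt.lower()
--
--     # If user selected a specific variant, respect it unless auto-routing is better
--     if selected_model == "yeti-web" or any(keyword in prompt_lower for keyword in ["search", "current", "latest", "news"]):
--         return "google/gemini-pro"
--     elif selected_model == "yeti-code" or any(keyword in prompt_lower for keyword in ["code", "programming", "debug"]):
--         return "openai/gpt-4-turbo"
--     elif selected_model == "yeti-creative" or any(keyword in prompt_lower for keyword in ["poem", "story", "creative"]):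
--         return "mistralai/mixtral-8x7b-instruct"
--     elif selected_model == "yeti-fast" or any(keyword in prompt_lower for keyword in ["quick", "fast", "brief"]):
--         return "anthropic/claude-3-haiku"
--     elif any(keyword in prompt_lower for keyword in ["summarize", "tl;dr"]):
--         return "anthropic/claude-3-haiku"
--     elif any(keyword in prompt_lower for keyword in ["translate"]):
--         return "google/gemini-pro"
--     else:
--         return "google/gemini-pro"  # Default to Gemini for general queries
-- ===== SOURCE B (Python) =====
-- # Priority-minimisation router: every signal (the selected name, each keyword)
-- # carries a priority; we take the MIN priority over all signals that fire and
-- # index a model table -- no ordered first-match ladder.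
-- _MODELS = ["google/gemini-pro", "openai/gpt-4-turbo",
--            "mistralai/mixtral-8x7b-instruct", "anthropic/claude-3-haiku",
--            "google/gemini-pro"]  # index 4 = default
--
-- _NAME_PRI = {"yeti-web": 0, "yeti-code": 1, "yeti-creative": 2, "yeti-fast": 3}
--
-- _KW_PRI = [("search", 0), ("current", 0), ("latest", 0), ("news", 0),
--            ("code", 1), ("programming", 1), ("debug", 1),
--            ("poem", 2), ("story", 2), ("creative", 2),
--            ("quick", 3), ("fast", 3), ("brief", 3),
--            ("summarize", 3), ("tl;dr", 3)]
--
-- def route_yeti_model(prompt: str, selected_model: str = "yeti-default") -> str: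
--     p = prompt.lower()
--     best = min([_NAME_PRI.get(selected_model, 4)] +
--                [pri for kw, pri in _KW_PRI if kw in p])
--     return _MODELS[best]
-- ===== Notes on version B (the rewrite author's own statement) =====
-- stated objective: alternative
-- what changed: Replaces A's first-match if/elif ladder with priority minimisation: every signal (the selected model name via a priority dict, and each keyword, scanned unconditionally) carries a numeric priority, and the minimum priority over all fired signals indexes a model table; equal-result branches collapse into shared priorities.
import Mathlib
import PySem

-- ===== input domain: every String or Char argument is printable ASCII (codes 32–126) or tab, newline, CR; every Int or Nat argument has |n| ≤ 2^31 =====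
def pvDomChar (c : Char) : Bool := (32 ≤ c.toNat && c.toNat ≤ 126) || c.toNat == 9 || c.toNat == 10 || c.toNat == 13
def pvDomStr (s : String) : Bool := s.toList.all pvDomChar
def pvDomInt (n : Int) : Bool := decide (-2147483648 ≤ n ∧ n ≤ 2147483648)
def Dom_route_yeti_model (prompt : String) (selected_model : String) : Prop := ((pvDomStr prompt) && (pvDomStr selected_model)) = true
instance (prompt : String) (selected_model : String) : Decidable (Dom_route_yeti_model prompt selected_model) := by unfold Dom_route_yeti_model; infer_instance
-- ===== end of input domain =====

-- B replaces A's first-match if/elif ladder with priority minimisation: every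
-- signal carries a priority, the minimum fired priority indexes a model table.

-- ===== PORT A =====
def route_yeti_model (prompt : String) (selected_model : String) : String :=
  let prompt_lower := PySem.Str.lower prompt
  if selected_model == "yeti-web" || ["search", "current", "latest", "news"].any (fun k => PySem.Str.isIn k prompt_lower) then
    "google/gemini-pro"
  else if selected_model == "yeti-code" || ["code", "programming", "debug"].any (fun k => PySem.Str.isIn k prompt_lower) then
    "openai/gpt-4-turbo"
  else if selected_model == "yeti-creative" || ["poem", "story", "creative"].any (fun k => PySem.Str.isIn k prompt_lower) then
    "mistralai/mixtral-8x7b-instruct"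
  else if selected_model == "yeti-fast" || ["quick", "fast", "brief"].any (fun k => PySem.Str.isIn k prompt_lower) then
    "anthropic/claude-3-haiku"
  else if ["summarize", "tl;dr"].any (fun k => PySem.Str.isIn k prompt_lower) then
    "anthropic/claude-3-haiku"
  else if ["translate"].any (fun k => PySem.Str.isIn k prompt_lower) then
    "google/gemini-pro"
  else
    "google/gemini-pro"

-- ===== PORT B =====
def pvModels : List String :=
  ["google/gemini-pro", "openai/gpt-4-turbo",
   "mistralai/mixtral-8x7b-instruct", "anthropic/claude-3-haiku",
   "google/gemini-pro"]

-- dict literal with distinct keys (= PySem.Dict.ofList on these pairs)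
def pvNamePri : PySem.Dict String Nat :=
  PySem.Dict.mk [("yeti-web", 0), ("yeti-code", 1), ("yeti-creative", 2), ("yeti-fast", 3)]

def pvKwPri : List (String × Nat) :=
  [("search", 0), ("current", 0), ("latest", 0), ("news", 0),
   ("code", 1), ("programming", 1), ("debug", 1),
   ("poem", 2), ("story", 2), ("creative", 2),
   ("quick", 3), ("fast", 3), ("brief", 3),
   ("summarize", 3), ("tl;dr", 3)]

def route_yeti_model_alt (prompt : String) (selected_model : String) : String :=
  let p := PySem.Str.lower prompt
  let namePri := PySem.Dict.getD pvNamePri selected_model 4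
  let best := ((pvKwPri.filter (fun kp => PySem.Str.isIn kp.1 p)).map Prod.snd).foldl Nat.min namePri
  pvModels.getD best ""

-- ===== PRECONDITION & SPEC =====
def Spec_route_yeti_model (prompt : String) (selected_model : String) (out : String) : Prop := out = route_yeti_model_alt prompt selected_model
instance (prompt : String) (selected_model : String) (out : String) : Decidable (Spec_route_yeti_model prompt selected_model out) := by unfold Spec_route_yeti_model; infer_instance

-- ===== CLAIM (what is proved, stated in full; the proofs are below) =====
def Claim_equal_route_yeti_model : Prop := ∀ (prompt : String) (selected_model : String), Dom_route_yeti_model prompt selected_model → Spec_route_yeti_model prompt selected_model (route_yeti_model prompt selected_model)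

-- ===== LEMMAS AND PROOFS =====

-- the min-fold over one keyword group of a single priority v is a single "any" test
theorem pvGrp (p : String) (v : Nat) (ks : List String) (a : Nat) :
    ((((ks.map (fun k => (k, v))).filter (fun kp => PySem.Str.isIn kp.1 p)).map Prod.snd).foldl Nat.min a)
      = if ks.any (fun k => PySem.Str.isIn k p) then Nat.min a v else a := by
  induction ks generalizing a with
  | nil => rfl
  | cons k ks ih =>
    by_cases h : PySem.Chars.isIn k.toList p.toList = true
    · rw [List.map_cons, List.filter_cons,
        if_pos (show PySem.Str.isIn (k, v).1 p = true from h),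
        List.map_cons, List.foldl_cons, ih]
      have hany : ((k :: ks).any fun k => PySem.Str.isIn k p) = true := by
        simp [List.any_cons, h]
      rw [hany]
      split <;> simp
    · rw [List.map_cons, List.filter_cons,
        if_neg (show ¬ PySem.Str.isIn (k, v).1 p = true from h), ih]
      have hany : ((k :: ks).any fun k => PySem.Str.isIn k p) = (ks.any fun k => PySem.Str.isIn k p) := by
        simp [List.any_cons, h]
      rw [hany]

-- the dict lookup is the obvious four-way test
theorem pvNamePriEq (sm : String) :
    PySem.Dict.getD pvNamePri sm 4
      = (if sm == "yeti-web" then 0 else if sm == "yeti-code" then 1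
         else if sm == "yeti-creative" then 2 else if sm == "yeti-fast" then 3 else 4) := by
  by_cases h0 : sm = "yeti-web"
  · simp [pvNamePri, PySem.Dict.getD, PySem.Dict.get?_mk_cons, h0]
  by_cases h1 : sm = "yeti-code"
  · simp [pvNamePri, PySem.Dict.getD, PySem.Dict.get?_mk_cons, h1]
  by_cases h2 : sm = "yeti-creative"
  · simp [pvNamePri, PySem.Dict.getD, PySem.Dict.get?_mk_cons, h2]
  by_cases h3 : sm = "yeti-fast"
  · simp [pvNamePri, PySem.Dict.getD, PySem.Dict.get?_mk_cons, h3]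
  · simp [pvNamePri, PySem.Dict.getD, PySem.Dict.get?,
      Ne.symm h0, Ne.symm h1, Ne.symm h2, Ne.symm h3, h0, h1, h2, h3]

-- ===== VERDICT (by name: the statement is the Claim_ definition above) =====
theorem route_yeti_model_spec : Claim_equal_route_yeti_model := by
  intro prompt selected_model _
  unfold Spec_route_yeti_model route_yeti_model route_yeti_model_alt pvModels
  rw [pvNamePriEq,
    show pvKwPri =
      (["search", "current", "latest", "news"].map (fun k => (k, 0)))
        ++ ((["code", "programming", "debug"].map (fun k => (k, 1)))
        ++ ((["poem", "story", "creative"].map (fun k => (k, 2)))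
        ++ ((["quick", "fast", "brief"].map (fun k => (k, 3)))
        ++ (["summarize", "tl;dr"].map (fun k => (k, 3)))))) from rfl]
  simp only [List.filter_append, List.map_append, List.foldl_append, pvGrp]
  generalize (["search", "current", "latest", "news"].any (fun k => PySem.Str.isIn k (PySem.Str.lower prompt))) = g0
  generalize (["code", "programming", "debug"].any (fun k => PySem.Str.isIn k (PySem.Str.lower prompt))) = g1
  generalize (["poem", "story", "creative"].any (fun k => PySem.Str.isIn k (PySem.Str.lower prompt))) = g2
  generalize (["quick", "fast", "brief"].any (fun k => PySem.Str.isIn k (PySem.Str.lower prompt))) = g3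
  generalize (["summarize", "tl;dr"].any (fun k => PySem.Str.isIn k (PySem.Str.lower prompt))) = g4
  generalize (["translate"].any (fun k => PySem.Str.isIn k (PySem.Str.lower prompt))) = g5
  generalize (selected_model == "yeti-web") = n0
  generalize (selected_model == "yeti-code") = n1
  generalize (selected_model == "yeti-creative") = n2
  generalize (selected_model == "yeti-fast") = n3
  revert g0 g1 g2 g3 g4 g5 n0 n1 n2 n3
  decide
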